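-- pv_equiv track=rewrite | github.com/utmittal/nyt-spelling-bee-solver | spelling_bee_solvers.py | _traverse_prefix_tree
-- ===== SOURCE A (Python) =====
-- def _traverse_prefix_tree(prefix: str, center: str, valid_letters: set[str],
--                           prefix_tree: dict[str, set[str]]) -> list[str]:
--     """
--     Recursive function to traverse through prefix tree to find all words formed by the given letters.
--
--     :param prefix: Current prefix string.
--     :param center: Central letter that must appear in a valid word
--     :param valid_letters: List of letters that we are trying to form words from.
--     :param prefix_tree: Prefix tree as a dict of prefixes to valid next characters
--     :return:
--     """
--     valid_words = []
--     next_char_set = prefix_tree[prefix]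
--
--     if '$' in next_char_set and center in prefix:
--         valid_words.append(prefix)
--
--     for letter in next_char_set:
--         if letter in valid_letters:
--             valid_words.extend(_traverse_prefix_tree(prefix + letter, center, valid_letters, prefix_tree))
--
--     return valid_words
-- ===== SOURCE B (Python) =====
-- def _traverse_prefix_tree(prefix: str, center: str, valid_letters: set[str],
--                           prefix_tree: dict[str, set[str]]) -> list[str]:
--     # Iterative worklist traversal: pop the first pending prefix, emit it if it
--     # ends a valid word, and prepend its valid-letter extensions so the next
--     # iteration continues depth-first in the recursion's pre-order.
--     valid_words = []
--     worklist = [prefix]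
--     while worklist:
--         p = worklist.pop(0)
--         next_char_set = prefix_tree[p]
--         if '$' in next_char_set and center in p:
--             valid_words.append(p)
--         worklist = [p + letter for letter in next_char_set if letter in valid_letters] + worklist
--     return valid_words
-- ===== Notes on version B (the rewrite author's own statement) =====
-- stated objective: alternative
-- what changed: Replaced the recursive pre-order trie traversal by an iterative worklist loop that pops the first pending prefix and prepends its valid-letter extensions, removing recursion while producing the identical word list.
-- outside the precondition, e.g. on _traverse_prefix_tree('a', 'a', {'x'}, {'a': {'$'}, 'ax': {'x'}}): A returns ['a'], B returns ['a']
import Mathlib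
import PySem

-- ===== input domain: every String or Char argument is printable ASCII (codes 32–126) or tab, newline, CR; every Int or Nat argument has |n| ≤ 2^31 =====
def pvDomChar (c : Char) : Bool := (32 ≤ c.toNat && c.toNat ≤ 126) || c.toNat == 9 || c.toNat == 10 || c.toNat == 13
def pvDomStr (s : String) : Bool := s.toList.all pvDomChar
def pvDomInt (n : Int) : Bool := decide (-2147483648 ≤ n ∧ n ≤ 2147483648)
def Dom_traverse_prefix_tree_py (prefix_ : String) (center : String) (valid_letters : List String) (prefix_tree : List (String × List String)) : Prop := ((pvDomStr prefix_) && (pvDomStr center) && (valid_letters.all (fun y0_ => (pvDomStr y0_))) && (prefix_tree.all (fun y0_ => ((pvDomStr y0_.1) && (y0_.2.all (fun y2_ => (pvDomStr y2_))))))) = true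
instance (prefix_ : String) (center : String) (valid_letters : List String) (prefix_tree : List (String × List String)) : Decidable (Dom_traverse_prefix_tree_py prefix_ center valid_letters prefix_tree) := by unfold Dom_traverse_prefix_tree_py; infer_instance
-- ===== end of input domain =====

-- B replaces A's recursive pre-order trie walk by an iterative worklist loop (pop the first
-- pending prefix, emit it, prepend its valid children); same return value, no speed claim.

-- ===== PORT A =====
-- helper lemmas cited by port A's `decreasing_by` termination argument
lemma pvLookupMem {β : Type} (l : List (String × β)) (a : String) (v : β)
    (h : List.lookup a l = some v) : (a, v) ∈ l := by
  induction l with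
  | nil => simp [List.lookup] at h
  | cons e t ih =>
    obtain ⟨k, w⟩ := e
    rw [List.lookup] at h
    by_cases he : a == k
    · simp only [he] at h
      have : a = k := eq_of_beq he
      subst this; simp at h; simp [h]
    · simp only [he] at h; right; exact ih h

lemma pvLookupKey {β : Type} (l : List (String × β)) (a : String)
    (h : (List.lookup a l).isSome = true) : a ∈ l.map Prod.fst := by
  obtain ⟨v, hv⟩ := Option.isSome_iff_exists.mp h
  exact List.mem_map.mpr ⟨(a, v), pvLookupMem l a v hv, rfl⟩

lemma pvFilterLenLt {α : Type} (xs : List α) (p q : α → Bool) (hpq : ∀ x, q x = true → p x = true)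
    (x : α) (hx : x ∈ xs) (hpx : p x = true) (hqx : q x = false) :
    (xs.filter q).length < (xs.filter p).length := by
  induction xs with
  | nil => cases hx
  | cons a t ih =>
    rcases List.mem_cons.mp hx with rfl | hxt
    · simp [List.filter, hpx, hqx]
      apply List.Sublist.length_le
      exact List.monotone_filter_right t (by intro y hy; exact hpq y hy)
    · by_cases hqa : q a = true
      · have hpa := hpq a hqa
        simp [List.filter, hqa, hpa]; exact ih hxt
      · simp at hqa
        by_cases hpa : p a = true
        · simp [List.filter, hqa, hpa]; exact Nat.le_of_lt (ih hxt)
        · simp at hpa; simp [List.filter, hqa, hpa]; exact ih hxt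

-- number of keys of the tree strictly longer than p: A's recursion measure
def pvKeysLonger (prefix_tree : List (String × List String)) (p : String) : Nat :=
  ((prefix_tree.map Prod.fst).filter (fun k => p.length < k.length)).length

lemma pvKeysLonger_lt (prefix_tree : List (String × List String)) (p c : String)
    (hmem : (List.lookup c prefix_tree).isSome = true) (hlen : p.length < c.length) :
    pvKeysLonger prefix_tree c < pvKeysLonger prefix_tree p := by
  unfold pvKeysLonger
  apply pvFilterLenLt _ _ _ _ c (pvLookupKey _ _ hmem)
  · exact decide_eq_true hlen
  · simp
  · intro x hx
    simp at hx ⊢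
    omega

def traverse_prefix_tree_py (prefix_ : String) (center : String) (valid_letters : List String) (prefix_tree : List (String × List String)) : List String :=
  match List.lookup prefix_ prefix_tree with
  | none => []   -- Python raises KeyError here (excluded by Pre_)
  | some next_char_set =>
    next_char_set.foldl
      (fun valid_words letter =>
        if valid_letters.contains letter then
          -- the dite guard only makes the recursion well-founded; it holds everywhere on Pre_
          if _h : letter ≠ "" ∧ (List.lookup (prefix_ ++ letter) prefix_tree).isSome = true then
            valid_words ++ traverse_prefix_tree_py (prefix_ ++ letter) center valid_letters prefix_tree
          else valid_words
        else valid_words)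
      (if next_char_set.contains "$" && PySem.Str.isIn center prefix_ then [prefix_] else [])
termination_by pvKeysLonger prefix_tree prefix_
decreasing_by
  apply pvKeysLonger_lt _ _ _ _h.2
  rw [String.length_append]
  have : letter.length ≠ 0 := fun h0 => _h.1 (String.length_eq_zero_iff.mp h0)
  omega

-- ===== PORT B =====
-- Source B's 'while worklist:' loop; the Nat fuel argument only makes the loop total in Lean
-- (on Pre_ it is never exhausted); each iteration pops the head p of the worklist and
-- prepends p's valid-letter extensions, exactly as Source B does with pop(0) and list prepend.
def pvWorklistLoop (center : String) (valid_letters : List String)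
    (prefix_tree : List (String × List String)) :
    Nat → List String → List String → List String
  | 0, _, valid_words => valid_words
  | _ + 1, [], valid_words => valid_words
  | fuel + 1, p :: rest, valid_words =>
    match List.lookup p prefix_tree with
    | none => valid_words   -- Python raises KeyError here (excluded by Pre_)
    | some next_char_set =>
      pvWorklistLoop center valid_letters prefix_tree fuel
        (((next_char_set.filter (fun letter => valid_letters.contains letter)).map
            (fun letter => p ++ letter)) ++ rest)
        (if next_char_set.contains "$" && PySem.Str.isIn center p then valid_words ++ [p]
         else valid_words)

def traverse_prefix_tree_py_alt (prefix_ : String) (center : String) (valid_letters : List String) (prefix_tree : List (String × List String)) : List String :=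
  pvWorklistLoop center valid_letters prefix_tree
    ((1 + (prefix_tree.map (fun e => e.2.length)).sum) ^ (prefix_tree.length + 1))
    [prefix_] []

-- ===== PRECONDITION & SPEC =====
-- Pre_ excludes the inputs on which A raises (KeyError on a prefix missing from the dict,
-- RecursionError via an empty-string letter); for checkability it is a closure condition over
-- the tree entries whose key extends prefix_, so it also excludes some inputs with a bad but
-- unreachable such entry, on which A still returns a value.
def Pre_traverse_prefix_tree_py (prefix_ : String) (center : String) (valid_letters : List String) (prefix_tree : List (String × List String)) : Prop :=
  (List.lookup prefix_ prefix_tree).isSome = true ∧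
  ∀ e ∈ prefix_tree, prefix_.toList <+: e.1.toList → ∀ l ∈ e.2, l ∈ valid_letters →
    l ≠ "" ∧ (List.lookup (e.1 ++ l) prefix_tree).isSome = true
instance (prefix_ : String) (center : String) (valid_letters : List String) (prefix_tree : List (String × List String)) : Decidable (Pre_traverse_prefix_tree_py prefix_ center valid_letters prefix_tree) := by unfold Pre_traverse_prefix_tree_py; infer_instance

def pvWitness_traverse_prefix_tree_py : String × String × List String × (List (String × List String)) :=
  ("a", "a", ["b"], [("a", ["b", "$"]), ("ab", ["$"])])

def Spec_traverse_prefix_tree_py (prefix_ : String) (center : String) (valid_letters : List String) (prefix_tree : List (String × List String)) (out : List String) : Prop := out = traverse_prefix_tree_py_alt prefix_ center valid_letters prefix_tree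
instance (prefix_ : String) (center : String) (valid_letters : List String) (prefix_tree : List (String × List String)) (out : List String) : Decidable (Spec_traverse_prefix_tree_py prefix_ center valid_letters prefix_tree out) := by unfold Spec_traverse_prefix_tree_py; infer_instance

-- ===== CLAIM (what is proved, stated in full; the proofs are below) =====
def Claim_equal_traverse_prefix_tree_py : Prop := ∀ (prefix_ : String) (center : String) (valid_letters : List String) (prefix_tree : List (String × List String)), Dom_traverse_prefix_tree_py prefix_ center valid_letters prefix_tree → Pre_traverse_prefix_tree_py prefix_ center valid_letters prefix_tree → Spec_traverse_prefix_tree_py prefix_ center valid_letters prefix_tree (traverse_prefix_tree_py prefix_ center valid_letters prefix_tree)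

-- ===== LEMMAS AND PROOFS =====

-- branching bound: 1 + total number of letters stored in the tree's value sets
def pvW (prefix_tree : List (String × List String)) : Nat :=
  1 + (prefix_tree.map (fun e => e.2.length)).sum

-- potential of a worklist: Σ W^(keysLonger q) over its entries — bounds B's remaining iterations
def pvPot (prefix_tree : List (String × List String)) (stack : List String) : Nat :=
  (stack.map (fun q => pvW prefix_tree ^ pvKeysLonger prefix_tree q)).sum

lemma pvPot_append (prefix_tree : List (String × List String)) (xs ys : List String) :
    pvPot prefix_tree (xs ++ ys) = pvPot prefix_tree xs + pvPot prefix_tree ys := by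
  simp [pvPot]

lemma pvValueLen (prefix_tree : List (String × List String)) (p : String) (v : List String)
    (h : List.lookup p prefix_tree = some v) : v.length ≤ pvW prefix_tree - 1 := by
  have hm : (p, v) ∈ prefix_tree := pvLookupMem _ _ _ h
  have : v.length ∈ prefix_tree.map (fun e => e.2.length) :=
    List.mem_map.mpr ⟨(p, v), hm, rfl⟩
  have := List.le_sum_of_mem this
  simp [pvW]; omega

lemma pvPot_children_lt (prefix_tree : List (String × List String)) (p : String)
    (ncs : List String) (hncs : List.lookup p prefix_tree = some ncs)
    (children : List String)
    (hlen : children.length ≤ ncs.length)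
    (hlt : ∀ c ∈ children, pvKeysLonger prefix_tree c < pvKeysLonger prefix_tree p) :
    pvPot prefix_tree children < pvW prefix_tree ^ pvKeysLonger prefix_tree p := by
  rcases children with _ | ⟨c0, cs⟩
  · simp [pvPot]
    exact Nat.pow_pos (by simp [pvW])
  · have hW : 1 ≤ pvW prefix_tree := by simp [pvW]
    have hm0 : pvKeysLonger prefix_tree c0 < pvKeysLonger prefix_tree p := hlt c0 (by simp)
    have hmp : 1 ≤ pvKeysLonger prefix_tree p := by omega
    have hbound : ∀ x ∈ (c0 :: cs).map (fun q => pvW prefix_tree ^ pvKeysLonger prefix_tree q),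
        x ≤ pvW prefix_tree ^ (pvKeysLonger prefix_tree p - 1) := by
      intro x hx
      obtain ⟨q, hq, rfl⟩ := List.mem_map.mp hx
      exact Nat.pow_le_pow_right hW (by have := hlt q hq; omega)
    have hsum := List.sum_le_card_nsmul _ _ hbound
    simp only [List.length_map, smul_eq_mul] at hsum
    have hc : (c0 :: cs).length ≤ pvW prefix_tree - 1 := le_trans hlen (pvValueLen _ _ _ hncs)
    have h1 : pvPot prefix_tree (c0 :: cs) ≤ (pvW prefix_tree - 1) * pvW prefix_tree ^ (pvKeysLonger prefix_tree p - 1) := by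
      unfold pvPot
      exact le_trans hsum (Nat.mul_le_mul_right _ hc)
    have h2 : (pvW prefix_tree - 1) * pvW prefix_tree ^ (pvKeysLonger prefix_tree p - 1)
        < pvW prefix_tree * pvW prefix_tree ^ (pvKeysLonger prefix_tree p - 1) := by
      exact (Nat.mul_lt_mul_right (Nat.pow_pos hW)).mpr (by simp [pvW])
    have h3 : pvW prefix_tree * pvW prefix_tree ^ (pvKeysLonger prefix_tree p - 1)
        = pvW prefix_tree ^ pvKeysLonger prefix_tree p := by
      rw [← pow_succ']
      congr 1
      omega
    omega

lemma pvFlatMapIf (l : List String) (P : String → Bool) (g : String → List String) :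
    (l.flatMap fun x => if P x then g x else []) = (l.filter P).flatMap g := by
  induction l with
  | nil => simp
  | cons a t ih =>
    by_cases ha : P a = true
    · simp [List.filter, ha, ih]
    · simp at ha; simp [List.filter, ha, ih]

-- unfolding A one level, under the closure condition of Pre_
lemma pvTravA_eq (prefix0 center : String) (valid_letters : List String)
    (prefix_tree : List (String × List String))
    (hC : ∀ e ∈ prefix_tree, prefix0.toList <+: e.1.toList → ∀ l ∈ e.2, l ∈ valid_letters →
      l ≠ "" ∧ (List.lookup (e.1 ++ l) prefix_tree).isSome = true)
    (p : String) (hpfx : prefix0.toList <+: p.toList)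
    (ncs : List String) (hp : List.lookup p prefix_tree = some ncs) :
    traverse_prefix_tree_py p center valid_letters prefix_tree =
      (if ncs.contains "$" && PySem.Str.isIn center p then [p] else []) ++
        ((ncs.filter fun l => valid_letters.contains l).flatMap
          fun l => traverse_prefix_tree_py (p ++ l) center valid_letters prefix_tree) := by
  rw [traverse_prefix_tree_py]
  simp only [hp]
  rw [PySem.List.foldl_congr_mem _ _
    (fun valid_words letter => valid_words ++
      (if valid_letters.contains letter
        then traverse_prefix_tree_py (p ++ letter) center valid_letters prefix_tree else [])) _
    (by
      intro acc l hl
      by_cases hv : valid_letters.contains l = true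
      · have hcl : l ∈ valid_letters := by simpa using hv
        have hg := hC (p, ncs) (pvLookupMem _ _ _ hp) hpfx l hl hcl
        rw [if_pos hv, dif_pos ⟨hg.1, hg.2⟩]
        simp [hcl]
      · have hncl : l ∉ valid_letters := by simpa using hv
        rw [if_neg hv]
        simp [hncl])]
  rw [PySem.List.foldl_append_eq_flatMap]
  rw [pvFlatMapIf]

-- B's loop computes acc ++ the concatenation of A's results over the worklist,
-- whenever the fuel dominates the worklist's potential
lemma pvWorklistLoop_eq (prefix0 center : String) (valid_letters : List String)
    (prefix_tree : List (String × List String))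
    (hC : ∀ e ∈ prefix_tree, prefix0.toList <+: e.1.toList → ∀ l ∈ e.2, l ∈ valid_letters →
      l ≠ "" ∧ (List.lookup (e.1 ++ l) prefix_tree).isSome = true) :
    ∀ (fuel : Nat) (stack : List String), pvPot prefix_tree stack ≤ fuel →
      (∀ q ∈ stack, prefix0.toList <+: q.toList ∧ (List.lookup q prefix_tree).isSome = true) →
      ∀ acc : List String,
        pvWorklistLoop center valid_letters prefix_tree fuel stack acc =
          acc ++ stack.flatMap (fun q => traverse_prefix_tree_py q center valid_letters prefix_tree) := by
  intro fuel
  induction fuel with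
  | zero =>
    intro stack hpot hsome acc
    cases stack with
    | nil => simp [pvWorklistLoop]
    | cons p rest =>
      exfalso
      have h1 : 1 ≤ pvW prefix_tree ^ pvKeysLonger prefix_tree p :=
        Nat.pow_pos (by simp [pvW])
      have h2 : pvPot prefix_tree (p :: rest) =
          pvW prefix_tree ^ pvKeysLonger prefix_tree p + pvPot prefix_tree rest := by
        simp [pvPot]
      omega
  | succ k ih =>
    intro stack hpot hsome acc
    cases stack with
    | nil => simp [pvWorklistLoop]
    | cons p rest =>
      have hpq := hsome p (by simp)
      have hpfx : prefix0.toList <+: p.toList := hpq.1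
      obtain ⟨ncs, hp⟩ := Option.isSome_iff_exists.mp hpq.2
      have hmem : (p, ncs) ∈ prefix_tree := pvLookupMem _ _ _ hp
      have hchild : ∀ l ∈ ncs.filter (fun l => valid_letters.contains l),
          p.length < (p ++ l).length ∧ (List.lookup (p ++ l) prefix_tree).isSome = true := by
        intro l hl
        obtain ⟨hlncs, hlv⟩ := List.mem_filter.mp hl
        have hcl : l ∈ valid_letters := by simpa using hlv
        have hg := hC (p, ncs) hmem hpfx l hlncs hcl
        refine ⟨?_, hg.2⟩
        rw [String.length_append]
        have : l.length ≠ 0 := fun h0 => hg.1 (String.length_eq_zero_iff.mp h0)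
        omega
      rw [pvWorklistLoop]
      simp only [hp]
      have hlt : ∀ c ∈ (ncs.filter (fun l => valid_letters.contains l)).map (fun l => p ++ l),
          pvKeysLonger prefix_tree c < pvKeysLonger prefix_tree p := by
        intro c hc
        obtain ⟨l, hl, rfl⟩ := List.mem_map.mp hc
        have := hchild l hl
        exact pvKeysLonger_lt prefix_tree p _ this.2 this.1
      have hdec : pvPot prefix_tree
          ((ncs.filter (fun l => valid_letters.contains l)).map (fun l => p ++ l) ++ rest) ≤ k := by
        rw [pvPot_append]
        have h1 : pvPot prefix_tree ((ncs.filter (fun l => valid_letters.contains l)).map (fun l => p ++ l))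
            < pvW prefix_tree ^ pvKeysLonger prefix_tree p := by
          apply pvPot_children_lt prefix_tree p ncs hp _ _ hlt
          rw [List.length_map]
          exact List.length_filter_le _ _
        have h2 : pvPot prefix_tree (p :: rest) =
            pvW prefix_tree ^ pvKeysLonger prefix_tree p + pvPot prefix_tree rest := by
          simp [pvPot]
        omega
      have hsome' : ∀ q ∈ (ncs.filter (fun l => valid_letters.contains l)).map (fun l => p ++ l) ++ rest,
          prefix0.toList <+: q.toList ∧ (List.lookup q prefix_tree).isSome = true := by
        intro q hq
        rcases List.mem_append.mp hq with hq | hq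
        · obtain ⟨l, hl, rfl⟩ := List.mem_map.mp hq
          refine ⟨?_, (hchild l hl).2⟩
          rw [String.toList_append]
          exact hpfx.trans (List.prefix_append _ _)
        · exact hsome q (List.mem_cons_of_mem _ hq)
      rw [ih _ hdec hsome']
      rw [List.flatMap_append, List.flatMap_map]
      rw [List.flatMap_cons]
      rw [pvTravA_eq prefix0 center valid_letters prefix_tree hC p hpfx ncs hp]
      split_ifs with hcond <;> simp [List.append_assoc]

-- the initial fuel dominates the initial worklist's potential
lemma pvFuel_ge (prefix_ : String) (prefix_tree : List (String × List String)) :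
    pvPot prefix_tree [prefix_] ≤
      (1 + (prefix_tree.map (fun e => e.2.length)).sum) ^ (prefix_tree.length + 1) := by
  have hW : 1 ≤ pvW prefix_tree := by simp [pvW]
  have hkl : pvKeysLonger prefix_tree prefix_ ≤ prefix_tree.length + 1 := by
    unfold pvKeysLonger
    have := List.length_filter_le (fun k => decide (prefix_.length < k.length)) (prefix_tree.map Prod.fst)
    simp at this
    omega
  have : pvPot prefix_tree [prefix_] = pvW prefix_tree ^ pvKeysLonger prefix_tree prefix_ := by
    simp [pvPot]
  rw [this]
  exact Nat.pow_le_pow_right hW hkl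

-- ===== VERDICT (by name: the statement is the Claim_ definition above) =====
theorem traverse_prefix_tree_py_spec : Claim_equal_traverse_prefix_tree_py := by
  intro prefix_ center valid_letters prefix_tree _hdom hpre
  obtain ⟨hp0, hC⟩ := hpre
  unfold Spec_traverse_prefix_tree_py traverse_prefix_tree_py_alt
  rw [pvWorklistLoop_eq prefix_ center valid_letters prefix_tree hC _ [prefix_]
    (pvFuel_ge prefix_ prefix_tree)
    (by intro q hq; simp at hq; subst hq; exact ⟨List.prefix_refl _, hp0⟩) []]
  simp
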